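-- pv_equiv track=rewrite | github.com/antiantilopa/Glorytopia | src/server/core/game_event.py | list_bool_to_list_int32
-- ===== SOURCE A (Python) =====
-- def list_bool_to_list_int32(x: list[bool]) -> list[int]:
--     result = []
--     for i in range(len(x) // 32 + (1 if len(x) % 32 else 0)):
--         num = 0
--         for j in range(32):
--             if 32 * i + j >= len(x):
--                 break
--             num += x[32 * i + j] * (2 **(31 - j))
--         result.append(num)
--     return result
-- ===== SOURCE B (Python) =====
-- # B: divide-and-conquer packing. A block of <= 32 bits becomes one word by Horner
-- # accumulation plus a left-align shift; longer inputs are split at a word-aligned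
-- # midpoint and the two halves are packed independently and concatenated.
-- def list_bool_to_list_int32(x: list[bool]) -> list[int]:
--     if not x:
--         return []
--     if len(x) <= 32:
--         num = 0
--         for b in x:
--             num = num * 2 + b
--         return [num * 2 ** (32 - len(x))]
--     mid = 32 * ((len(x) + 31) // 64)  # word-aligned midpoint, 32 <= mid < len(x)
--     return list_bool_to_list_int32(x[:mid]) + list_bool_to_list_int32(x[mid:])
-- ===== Notes on version B (the rewrite author's own statement) =====
-- stated objective: alternative
-- what changed: Replaces A's linear word-by-word packing loop (inner 32-step weighted sum computing 2**(31-j) per bit, with break) by divide-and-conquer: blocks of at most 32 bits become one word via Horner accumulation (num = num*2 + b) plus a left-align shift, longer inputs are split at a word-aligned midpoint and the two packed halves concatenated.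
import Mathlib
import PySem

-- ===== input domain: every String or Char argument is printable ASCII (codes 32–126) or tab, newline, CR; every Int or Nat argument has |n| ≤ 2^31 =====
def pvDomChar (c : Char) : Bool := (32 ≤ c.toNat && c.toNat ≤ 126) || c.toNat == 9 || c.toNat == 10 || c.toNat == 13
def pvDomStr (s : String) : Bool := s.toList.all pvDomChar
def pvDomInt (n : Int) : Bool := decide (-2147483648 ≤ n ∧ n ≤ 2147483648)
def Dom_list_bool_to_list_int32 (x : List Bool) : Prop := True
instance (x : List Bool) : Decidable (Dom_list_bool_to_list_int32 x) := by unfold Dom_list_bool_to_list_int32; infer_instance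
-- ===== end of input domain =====

-- B packs the bools by divide and conquer (Horner per ≤32-bit block, word-aligned split
-- otherwise) instead of A's linear outer-chunk loop; return values proved equal on all inputs.

-- ===== PORT A =====
-- inner loop: `for j in range(32): if 32*i+j >= len(x): break; num += x[32*i+j]*(2**(31-j))`
-- (the guard ensures the index is in range, so `List.getD` is exact for `x[32*i+j]`;
--  Python's bool*int is `if bit then weight else 0`)
def aInner (x : List Bool) (i : Nat) (j : Nat) (num : Int) : Int :=
  if j < 32 then
    if x.length ≤ 32 * i + j then num
    else aInner x i (j + 1) (num + (if x.getD (32 * i + j) false then (2 : Int) ^ (31 - j) else 0))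
  else num
termination_by 32 - j
decreasing_by omega

def list_bool_to_list_int32 (x : List Bool) : List Int :=
  (List.range (x.length / 32 + (if x.length % 32 ≠ 0 then 1 else 0))).foldl
    (fun result i => result ++ [aInner x i 0 0]) []

-- ===== PORT B =====
-- base case: `num = 0; for b in x: num = num*2 + b; return [num * 2**(32-len(x))]`
-- (Python's bool in arithmetic is 1/0); recursive case: word-aligned slices x[:mid], x[32*...:]
-- — nonnegative in-range bounds, so `take`/`drop` are exact for them.
def list_bool_to_list_int32_alt (x : List Bool) : List Int :=
  if x.length = 0 then []
  else if _h32 : x.length ≤ 32 then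
    [(x.foldl (fun num b => num * 2 + (if b then 1 else 0)) 0) * (2 : Int) ^ (32 - x.length)]
  else
    list_bool_to_list_int32_alt (x.take (32 * ((x.length + 31) / 64))) ++
      list_bool_to_list_int32_alt (x.drop (32 * ((x.length + 31) / 64)))
termination_by x.length
decreasing_by
  · have : 32 ≤ 32 * ((x.length + 31) / 64) ∧ 32 * ((x.length + 31) / 64) < x.length := by omega
    simp [List.length_take]; omega
  · have : 32 ≤ 32 * ((x.length + 31) / 64) := by omega
    simp [List.length_drop]; omega

-- ===== PRECONDITION & SPEC =====
def Spec_list_bool_to_list_int32 (x : List Bool) (out : List Int) : Prop := out = list_bool_to_list_int32_alt x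
instance (x : List Bool) (out : List Int) : Decidable (Spec_list_bool_to_list_int32 x out) := by unfold Spec_list_bool_to_list_int32; infer_instance

-- ===== CLAIM (what is proved, stated in full; the proofs are below) =====
def Claim_equal_list_bool_to_list_int32 : Prop := ∀ (x : List Bool), Dom_list_bool_to_list_int32 x → Spec_list_bool_to_list_int32 x (list_bool_to_list_int32 x)

-- ===== LEMMAS AND PROOFS =====

-- word k of x, counting only bits with global index < m (big-endian weights)
def pw (x : List Bool) (k m : Nat) : Int :=
  ∑ j ∈ Finset.range 32,
    if 32 * k + j < m ∧ x.getD (32 * k + j) false = true then (2 : Int) ^ (31 - j) else 0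

theorem aInner_eq (x : List Bool) (i : Nat) :
    ∀ (d j : Nat), j + d = 32 → ∀ num,
      aInner x i j num = num + ∑ t ∈ Finset.Ico j 32,
        (if 32 * i + t < x.length ∧ x.getD (32 * i + t) false = true then (2 : Int) ^ (31 - t) else 0) := by
  intro d
  induction d with
  | zero =>
    intro j hj num
    subst_vars
    rw [aInner]
    simp
  | succ d ih =>
    intro j hj num
    have hjlt : j < 32 := by omega
    rw [aInner, if_pos hjlt]
    by_cases hlen : x.length ≤ 32 * i + j
    · rw [if_pos hlen]
      have : ∀ t ∈ Finset.Ico j 32,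
          (if 32 * i + t < x.length ∧ x.getD (32 * i + t) false = true then (2 : Int) ^ (31 - t) else 0) = 0 := by
        intro t ht
        rw [Finset.mem_Ico] at ht
        rw [if_neg]
        rintro ⟨h1, _⟩
        omega
      rw [Finset.sum_eq_zero this]
      ring
    · rw [if_neg hlen, ih (j + 1) (by omega)]
      rw [Finset.sum_eq_sum_Ico_succ_bot hjlt]
      have hfj : (if 32 * i + j < x.length ∧ x.getD (32 * i + j) false = true then (2 : Int) ^ (31 - j) else 0)
          = (if x.getD (32 * i + j) false then (2 : Int) ^ (31 - j) else 0) := by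
        have hlt : 32 * i + j < x.length := by omega
        by_cases hb : x.getD (32 * i + j) false <;> simp [hlt]
      rw [hfj]
      ring

theorem foldl_app_map (f : Nat → Int) :
    ∀ (l : List Nat) (acc : List Int), l.foldl (fun r i => r ++ [f i]) acc = acc ++ l.map f := by
  intro l
  induction l with
  | nil => simp
  | cons a l ih => intro acc; simp [List.foldl_cons, ih]

theorem a_eq_map (x : List Bool) :
    list_bool_to_list_int32 x =
      (List.range ((x.length + 31) / 32)).map (fun k => pw x k x.length) := by
  unfold list_bool_to_list_int32
  rw [foldl_app_map]
  have hn : x.length / 32 + (if x.length % 32 ≠ 0 then 1 else 0) = (x.length + 31) / 32 := by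
    by_cases h : x.length % 32 ≠ 0 <;> simp [h] <;> omega
  rw [hn]
  simp only [List.nil_append]
  refine List.map_congr_left (fun i _ => ?_)
  rw [aInner_eq x i 32 0 rfl 0, pw, Finset.range_eq_Ico]
  ring

-- Horner accumulation over a bool list, with an arbitrary accumulator
theorem horner_eq (x : List Bool) :
    ∀ a : Int, x.foldl (fun num b => num * 2 + (if b then 1 else 0)) a
      = a * 2 ^ x.length +
        ∑ j ∈ Finset.range x.length,
          (if x.getD j false then (2 : Int) ^ (x.length - 1 - j) else 0) := by
  induction x with
  | nil => intro a; simp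
  | cons b bs ih =>
    intro a
    rw [List.foldl_cons, ih]
    simp only [List.length_cons]
    rw [Finset.sum_range_succ']
    simp only [List.getD_cons_succ, List.getD_cons_zero]
    have h1 : ∀ j : ℕ, bs.length + 1 - 1 - (j + 1) = bs.length - 1 - j := fun j => by omega
    have h2 : bs.length + 1 - 1 - 0 = bs.length := by omega
    simp only [h1, h2]
    cases b <;> simp <;> ring

-- single-word case: the Horner value, left-aligned, is word 0
theorem horner_pw (x : List Bool) (h32 : x.length ≤ 32) :
    (x.foldl (fun num b => num * 2 + (if b then 1 else 0)) 0) * (2 : Int) ^ (32 - x.length)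
      = pw x 0 x.length := by
  rw [horner_eq, pw, zero_mul, zero_add, Finset.sum_mul]
  have hsub : Finset.range x.length ⊆ Finset.range 32 := by
    intro j hj; rw [Finset.mem_range] at *; omega
  rw [← Finset.sum_subset hsub (fun j _ hnj => by
      rw [Finset.mem_range, not_lt] at hnj
      rw [if_neg]; rintro ⟨hc, _⟩; omega)]
  refine Finset.sum_congr rfl (fun j hj => ?_)
  rw [Finset.mem_range] at hj
  have hz : (32 * 0 + j < x.length ∧ x.getD (32 * 0 + j) false = true) ↔ (x.getD j false = true) := by
    constructor
    · rintro ⟨_, hb⟩; simpa using hb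
    · intro hb; exact ⟨by omega, by simpa using hb⟩
  by_cases hb : x.getD j false = true
  · rw [if_pos hb, if_pos (hz.mpr hb), ← pow_add]
    congr 1
    omega
  · rw [if_neg hb, if_neg (fun hc => hb (hz.mp hc)), zero_mul]

theorem getD_take (x : List Bool) (m i : Nat) (h : i < m) :
    (x.take m).getD i false = x.getD i false := by
  simp only [List.getD_eq_getElem?_getD, List.getElem?_take]
  simp [h]

theorem getD_drop (x : List Bool) (m i : Nat) :
    (x.drop m).getD i false = x.getD (m + i) false := by
  simp [List.getD_eq_getElem?_getD, List.getElem?_drop]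

-- left half: word k of x.take (32*m) (k < m) is word k of x
theorem pw_take (x : List Bool) (m k : Nat) (hk : k < m) (hm : 32 * m ≤ x.length) :
    pw (x.take (32 * m)) k (32 * m) = pw x k x.length := by
  unfold pw
  refine Finset.sum_congr rfl (fun j hj => ?_)
  rw [Finset.mem_range] at hj
  have hlt : 32 * k + j < 32 * m := by omega
  rw [getD_take x (32 * m) _ hlt]
  exact if_congr (and_congr_left' (iff_of_true hlt (by omega))) rfl rfl

-- right half: word k of x.drop (32*m) is word m+k of x
theorem pw_drop (x : List Bool) (m k : Nat) (hm : 32 * m ≤ x.length) :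
    pw (x.drop (32 * m)) k (x.length - 32 * m) = pw x (m + k) x.length := by
  unfold pw
  refine Finset.sum_congr rfl (fun j hj => ?_)
  rw [getD_drop x (32 * m) _]
  have h1 : 32 * m + (32 * k + j) = 32 * (m + k) + j := by ring
  rw [h1]
  have h2 : (32 * k + j < x.length - 32 * m) ↔ (32 * (m + k) + j < x.length) := by omega
  simp only [h2]

theorem b_eq_map (x : List Bool) :
    list_bool_to_list_int32_alt x =
      (List.range ((x.length + 31) / 32)).map (fun k => pw x k x.length) := by
  rw [list_bool_to_list_int32_alt]
  by_cases h0 : x.length = 0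
  · simp [h0]
  · rw [if_neg h0]
    by_cases h32 : x.length ≤ 32
    · rw [dif_pos h32]
      have hn : (x.length + 31) / 32 = 1 := by omega
      rw [hn]
      simp only [List.range_one, List.map_cons, List.map_nil]
      rw [horner_pw x h32]
    · rw [dif_neg h32]
      set m := (x.length + 31) / 64 with hm
      have hmid : 32 ≤ 32 * m ∧ 32 * m < x.length := by omega
      have ihl := b_eq_map (x.take (32 * m))
      have ihr := b_eq_map (x.drop (32 * m))
      rw [ihl, ihr]
      have hlt : (x.take (32 * m)).length = 32 * m := by
        simp [List.length_take]; omega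
      have hld : (x.drop (32 * m)).length = x.length - 32 * m := by
        simp [List.length_drop]
      rw [hlt, hld]
      have hcount : (x.length + 31) / 32 = m + (x.length - 32 * m + 31) / 32 := by omega
      have hcl : (32 * m + 31) / 32 = m := by omega
      rw [hcl, hcount, List.range_add, List.map_append, List.map_map]
      congr 1
      · refine List.map_congr_left (fun k hk => ?_)
        rw [List.mem_range] at hk
        exact pw_take x m k hk (by omega)
      · refine List.map_congr_left (fun k _ => ?_)
        simp only [Function.comp_apply]
        exact pw_drop x m k (by omega)
termination_by x.length
decreasing_by
  · simp [List.length_take]; omega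
  · simp [List.length_drop]; omega

-- ===== VERDICT (by name: the statement is the Claim_ definition above) =====
theorem list_bool_to_list_int32_spec : Claim_equal_list_bool_to_list_int32 := by
  intro x _
  unfold Spec_list_bool_to_list_int32
  rw [a_eq_map, b_eq_map]
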